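-- pv_equiv track=rewrite | github.com/rojinibrahim/habit-tracker-game | main.py | get_habit_level
-- ===== SOURCE A (Python) =====
-- def get_habit_level(guild: str, habit_xp: int):
--
--     ranks = {
--         "fitness": [(120, "Master"), (70, "Warrior"), (30, "Explorer")],
--         "health": [(120, "Master"), (70, "Cultivator"), (30, "Guardian")],
--         "education": [(120, "Master"), (70, "Scholar"), (30, "Sage")]
--     }
--
--     if guild not in ranks:
--         return "Unknown"
--
--     for xp_needed, title in ranks[guild]:
--         if habit_xp >= xp_needed:
--             return title
--
--     return "Apprentice"
-- ===== SOURCE B (Python) =====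
-- import bisect
--
-- _THRESHOLDS = [30, 70, 120]
--
-- _TITLES = {
--     "fitness": ["Apprentice", "Explorer", "Warrior", "Master"],
--     "health": ["Apprentice", "Guardian", "Cultivator", "Master"],
--     "education": ["Apprentice", "Sage", "Scholar", "Master"],
-- }
--
--
-- def get_habit_level(guild: str, habit_xp: int):
--     titles = _TITLES.get(guild)
--     if titles is None:
--         return "Unknown"
--     return titles[bisect.bisect_right(_THRESHOLDS, habit_xp)]
-- ===== Notes on version B (the rewrite author's own statement) =====
-- stated objective: idiomatic
-- what changed: Replaces the descending linear scan over per-guild (threshold, title) pairs with a bisect_right lookup into a shared ascending thresholds table indexing per-guild title lists with 'Apprentice' at index 0.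
import Mathlib
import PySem

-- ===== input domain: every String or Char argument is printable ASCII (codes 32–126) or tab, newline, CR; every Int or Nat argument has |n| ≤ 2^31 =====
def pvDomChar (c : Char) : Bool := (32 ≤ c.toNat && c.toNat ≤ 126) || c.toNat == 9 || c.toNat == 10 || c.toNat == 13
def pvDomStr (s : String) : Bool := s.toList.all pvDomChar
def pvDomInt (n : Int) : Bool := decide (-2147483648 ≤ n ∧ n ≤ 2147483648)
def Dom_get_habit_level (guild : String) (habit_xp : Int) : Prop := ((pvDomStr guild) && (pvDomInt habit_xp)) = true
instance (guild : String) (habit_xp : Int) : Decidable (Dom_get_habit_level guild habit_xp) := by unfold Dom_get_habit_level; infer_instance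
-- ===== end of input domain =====

-- B replaces A's descending linear scan with a bisect_right index into ascending per-guild title lists (idiomatic).


-- ===== PORT A =====
-- loop over ranks[guild]: first (xp_needed, title) with habit_xp >= xp_needed
def rankLoop (pairs : List (Int × String)) (habit_xp : Int) : String :=
  match pairs with
  | [] => "Apprentice"
  | (xp_needed, title) :: rest =>
    if habit_xp ≥ xp_needed then title else rankLoop rest habit_xp

def get_habit_level (guild : String) (habit_xp : Int) : String :=
  let ranks : List (String × List (Int × String)) :=
    [("fitness", [((120:Int), "Master"), (70, "Warrior"), (30, "Explorer")]),
     ("health", [((120:Int), "Master"), (70, "Cultivator"), (30, "Guardian")]),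
     ("education", [((120:Int), "Master"), (70, "Scholar"), (30, "Sage")])]
  match ranks.lookup guild with
  | none => "Unknown"
  | some pairs => rankLoop pairs habit_xp

-- ===== PORT B =====
def get_habit_level_alt (guild : String) (habit_xp : Int) : String :=
  let titles : List (String × List String) :=
    [("fitness", ["Apprentice", "Explorer", "Warrior", "Master"]),
     ("health", ["Apprentice", "Guardian", "Cultivator", "Master"]),
     ("education", ["Apprentice", "Sage", "Scholar", "Master"])]
  match titles.lookup guild with
  | none => "Unknown"
  | some ts =>
    -- titles[guild][bisect.bisect_right(_THRESHOLDS, habit_xp)] ; index is always 0..3, in range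
    (PySem.List.pyGet? ts (PySem.List.bisectRight [(30:Int), 70, 120] habit_xp)).getD ""

-- ===== PRECONDITION & SPEC =====
def Spec_get_habit_level (guild : String) (habit_xp : Int) (out : String) : Prop := out = get_habit_level_alt guild habit_xp
instance (guild : String) (habit_xp : Int) (out : String) : Decidable (Spec_get_habit_level guild habit_xp out) := by unfold Spec_get_habit_level; infer_instance

-- ===== CLAIM (what is proved, stated in full; the proofs are below) =====
def Claim_equal_get_habit_level : Prop := ∀ (guild : String) (habit_xp : Int), Dom_get_habit_level guild habit_xp → Spec_get_habit_level guild habit_xp (get_habit_level guild habit_xp)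

-- ===== LEMMAS AND PROOFS =====

-- closed-form value of bisect_right on the fixed thresholds table
theorem bisect_thresholds (x : Int) :
    PySem.List.bisectRight [(30:Int), 70, 120] x =
      if x < 30 then 0 else if x < 70 then 1 else if x < 120 then 2 else 3 := by
  obtain ⟨hle, hlt, hge⟩ := PySem.List.bisectRight_spec [(30:Int), 70, 120] x (by decide)
  set k := PySem.List.bisectRight [(30:Int), 70, 120] x with hk
  simp only [List.length_cons, List.length_nil] at hle
  interval_cases k
  · have h := hge 0 (by norm_num) (by omega); simp at h; split_ifs <;> omega
  · have h1 := hlt 0 (by norm_num) (by omega); have h2 := hge 1 (by norm_num) (by omega)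
    simp at h1 h2; split_ifs <;> omega
  · have h1 := hlt 1 (by norm_num) (by omega); have h2 := hge 2 (by norm_num) (by omega)
    simp at h1 h2; split_ifs <;> omega
  · have h1 := hlt 2 (by norm_num) (by omega)
    simp at h1; split_ifs <;> omega

-- ===== VERDICT (by name: the statement is the Claim_ definition above) =====
theorem get_habit_level_spec : Claim_equal_get_habit_level := by
  intro guild habit_xp _
  unfold Spec_get_habit_level get_habit_level get_habit_level_alt
  by_cases h1 : guild = "fitness"
  · subst h1
    simp only [List.lookup, BEq.rfl, if_pos, rankLoop, bisect_thresholds]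
    split_ifs <;> first | omega | (simp [rankLoop, PySem.List.pyGet?, PySem.List.pyIdx?]; split_ifs <;> first | rfl | omega) | rfl
  by_cases h2 : guild = "health"
  · subst h2
    simp only [List.lookup, BEq.rfl, if_pos, rankLoop, bisect_thresholds]
    split_ifs <;> first | omega | (simp [rankLoop, PySem.List.pyGet?, PySem.List.pyIdx?]; split_ifs <;> first | rfl | omega) | rfl
  by_cases h3 : guild = "education"
  · subst h3
    simp only [List.lookup, BEq.rfl, if_pos, rankLoop, bisect_thresholds]
    split_ifs <;> first | omega | (simp [rankLoop, PySem.List.pyGet?, PySem.List.pyIdx?]; split_ifs <;> first | rfl | omega) | rfl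
  · have e1 : (guild == "fitness") = false := beq_eq_false_iff_ne.mpr h1
    have e2 : (guild == "health") = false := beq_eq_false_iff_ne.mpr h2
    have e3 : (guild == "education") = false := beq_eq_false_iff_ne.mpr h3
    simp [List.lookup, e1, e2, e3]
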